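-- pv_equiv track=rewrite | github.com/chris00walker/bmdp-papain-analysis | tools/parse_business_brief.py | clean_bullet_points
-- ===== SOURCE A (Python) =====
-- def clean_bullet_points(text):
--     """Clean and format bullet points from extracted text"""
--     lines = text.strip().split('\n')
--     cleaned = []
--     for line in lines:
--         line = line.strip()
--         if line and line.startswith('*'):
--             # Remove leading * and clean up
--             cleaned.append(line[1:].strip())
--         elif line and not line.startswith('*') and cleaned:
--             # Continuation of previous line
--             cleaned[-1] += ' ' + line
--     return cleaned
-- ===== SOURCE B (Python) =====
-- def clean_bullet_points(text):
--     """Clean and format bullet points from extracted text.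
--
--     Recursive grouping: take each bullet line as a group head, gather the
--     following non-bullet lines as its continuation body, and join each
--     group with spaces. Pre-bullet continuation lines are skipped.
--     """
--     lines = [l for l in (raw.strip() for raw in text.strip().split('\n')) if l]
--
--     def build(rest):
--         if not rest:
--             return []
--         head = rest[0]
--         if not head.startswith('*'):
--             return build(rest[1:])
--         body = []
--         i = 1
--         while i < len(rest) and not rest[i].startswith('*'):
--             body.append(rest[i])
--             i += 1
--         return [' '.join([head[1:].strip()] + body)] + build(rest[i:])
--
--     return build(lines)
-- ===== Notes on version B (the rewrite author's own statement) =====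
-- stated objective: alternative
-- what changed: A folds over lines mutating the last element of the accumulator to append continuations; B pre-filters the stripped lines and recursively splits them into bullet-headed groups (head plus following continuation lines), joining each group with spaces.
import Mathlib
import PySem

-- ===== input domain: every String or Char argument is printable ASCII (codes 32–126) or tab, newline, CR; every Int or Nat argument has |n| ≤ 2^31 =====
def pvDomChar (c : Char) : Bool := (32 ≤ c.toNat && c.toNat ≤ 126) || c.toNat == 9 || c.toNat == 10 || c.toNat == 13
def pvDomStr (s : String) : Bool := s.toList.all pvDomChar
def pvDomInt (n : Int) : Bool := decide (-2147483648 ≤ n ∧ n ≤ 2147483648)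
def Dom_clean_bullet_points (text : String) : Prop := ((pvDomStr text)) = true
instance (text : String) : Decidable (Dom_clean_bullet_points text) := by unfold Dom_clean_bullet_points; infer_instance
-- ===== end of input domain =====

-- B replaces A's fold that mutates the last accumulated string with a recursive
-- grouping of bullet heads and their continuation bodies, joined per group (objective: alternative).

-- ===== PORT A =====
def clean_bullet_points (text : String) : List String :=
  let lines := (PySem.Str.split? (PySem.Str.strip text) "\n").getD []
  lines.foldl
    (fun cleaned line0 =>
      let line := PySem.Str.strip line0
      if line ≠ "" ∧ PySem.Str.startswith line "*" = true then
        cleaned ++ [PySem.Str.strip (PySem.Str.slice line (some 1) none)]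
      else if line ≠ "" ∧ PySem.Str.startswith line "*" = false ∧ cleaned ≠ [] then
        cleaned.dropLast ++ [cleaned.getLast! ++ " " ++ line]
      else cleaned)
    []

-- ===== PORT B =====
-- B's while loop gathering the continuation body (stopping at the next bullet)
-- is ported as takeWhile for the body and dropWhile for the remaining lines.
def pvBuild (rest : List String) : List String :=
  match rest with
  | [] => []
  | head :: tail =>
    if PySem.Str.startswith head "*" = false then pvBuild tail
    else
      let body := tail.takeWhile (fun l => !PySem.Str.startswith l "*")
      PySem.Str.join " " (PySem.Str.strip (PySem.Str.slice head (some 1) none) :: body)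
        :: pvBuild (tail.dropWhile (fun l => !PySem.Str.startswith l "*"))
termination_by rest.length
decreasing_by
  · simp
  · simpa using Nat.lt_succ_of_le (List.length_dropWhile_le _ _)

def clean_bullet_points_alt (text : String) : List String :=
  let lines := (((PySem.Str.split? (PySem.Str.strip text) "\n").getD []).map
      (fun raw => PySem.Str.strip raw)).filter (fun l => l ≠ "")
  pvBuild lines

-- ===== PRECONDITION & SPEC =====
def Spec_clean_bullet_points (text : String) (out : List String) : Prop := out = clean_bullet_points_alt text
instance (text : String) (out : List String) : Decidable (Spec_clean_bullet_points text out) := by unfold Spec_clean_bullet_points; infer_instance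

-- ===== CLAIM (what is proved, stated in full; the proofs are below) =====
def Claim_equal_clean_bullet_points : Prop := ∀ (text : String), Dom_clean_bullet_points text → Spec_clean_bullet_points text (clean_bullet_points text)

-- ===== LEMMAS AND PROOFS =====

-- A's loop body applied to an ALREADY-STRIPPED line
def pvStep (cleaned : List String) (line : String) : List String :=
  if line ≠ "" ∧ PySem.Str.startswith line "*" = true then
    cleaned ++ [PySem.Str.strip (PySem.Str.slice line (some 1) none)]
  else if line ≠ "" ∧ PySem.Str.startswith line "*" = false ∧ cleaned ≠ [] then
    cleaned.dropLast ++ [cleaned.getLast! ++ " " ++ line]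
  else cleaned

theorem pvStep_empty (cleaned : List String) : pvStep cleaned "" = cleaned := by
  simp [pvStep]

-- skipping empty lines does not change A's fold
theorem pvFoldl_filter (ls : List String) (acc : List String) :
    ls.foldl pvStep acc = (ls.filter (fun l => l ≠ "")).foldl pvStep acc := by
  induction ls generalizing acc with
  | nil => rfl
  | cons h t ih =>
    by_cases hh : h = ""
    · subst hh; simpa [pvStep_empty] using ih acc
    · simp [hh, List.foldl_cons, ih]

theorem pv_join_singleton (s : String) : PySem.Str.join " " [s] = s := by
  apply String.ext; simp [PySem.Str.toList_join, PySem.Chars.join_singleton]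

theorem pv_join_cons (s t : String) (r : List String) :
    PySem.Str.join " " (s :: t :: r) = PySem.Str.join " " ((s ++ " " ++ t) :: r) := by
  apply String.ext
  cases r with
  | nil => simp [PySem.Str.toList_join, PySem.Chars.join_cons_cons, PySem.Chars.join_singleton]
  | cons x xs => simp [PySem.Str.toList_join, PySem.Chars.join_cons_cons]

theorem pvBuild_cons (h : String) (t : List String) :
    pvBuild (h :: t) =
      if PySem.Str.startswith h "*" = false then pvBuild t
      else
        PySem.Str.join " " (PySem.Str.strip (PySem.Str.slice h (some 1) none)
            :: t.takeWhile (fun l => !PySem.Str.startswith l "*"))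
          :: pvBuild (t.dropWhile (fun l => !PySem.Str.startswith l "*")) := by
  rw [pvBuild]

-- main invariant: A's fold with a nonempty accumulator appends continuation
-- lines to the last string until the next bullet, i.e. builds B's groups
theorem pvFold_concat (ls : List String) (acc : List String) (s : String)
    (hne : ∀ l ∈ ls, l ≠ "") :
    ls.foldl pvStep (acc ++ [s]) =
      acc ++ PySem.Str.join " "
          (s :: ls.takeWhile (fun l => !PySem.Str.startswith l "*"))
        :: pvBuild (ls.dropWhile (fun l => !PySem.Str.startswith l "*")) := by
  induction ls generalizing acc s with
  | nil => simp [pvBuild, pv_join_singleton]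
  | cons h t ih =>
    have hh : h ≠ "" := hne h (by simp)
    have hts : ∀ l ∈ t, l ≠ "" := fun l hl => hne l (by simp [hl])
    by_cases hb : PySem.Str.startswith h "*" = true
    · have hbC : PySem.Chars.startswith h.toList ['*'] = true := by simpa using hb
      have step : pvStep (acc ++ [s]) h =
          (acc ++ [s]) ++ [PySem.Str.strip (PySem.Str.slice h (some 1) none)] := by
        simp only [pvStep, hb]
        simp [hh]
      rw [List.foldl_cons, step, ih (acc ++ [s]) _ hts]
      simp [pvBuild_cons, hbC, pv_join_singleton]
    · have hb' : PySem.Str.startswith h "*" = false := by simpa using hb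
      have hbC : PySem.Chars.startswith h.toList ['*'] = false := by simpa using hb'
      have step : pvStep (acc ++ [s]) h = acc ++ [s ++ " " ++ h] := by
        simp only [pvStep, hb']
        simp [hh]
      rw [List.foldl_cons, step, ih acc _ hts]
      simp [hbC, pv_join_cons]

-- from the empty accumulator A's fold is exactly B's recursive grouping
theorem pvFold_nil (ls : List String) (hne : ∀ l ∈ ls, l ≠ "") :
    ls.foldl pvStep [] = pvBuild ls := by
  induction ls with
  | nil => rw [pvBuild]; rfl
  | cons h t ih =>
    have hh : h ≠ "" := hne h (by simp)
    have hts : ∀ l ∈ t, l ≠ "" := fun l hl => hne l (by simp [hl])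
    by_cases hb : PySem.Str.startswith h "*" = true
    · have hbC : PySem.Chars.startswith h.toList ['*'] = true := by simpa using hb
      have step : pvStep [] h =
          [] ++ [PySem.Str.strip (PySem.Str.slice h (some 1) none)] := by
        simp only [pvStep, hb]
        simp [hh]
      rw [List.foldl_cons, step,
        pvFold_concat t [] (PySem.Str.strip (PySem.Str.slice h (some 1) none)) hts]
      simp [pvBuild_cons, hbC]
    · have hb' : PySem.Str.startswith h "*" = false := by simpa using hb
      have hbC : PySem.Chars.startswith h.toList ['*'] = false := by simpa using hb'
      have step : pvStep [] h = [] := by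
        simp only [pvStep, hb']
        simp [hh]
      rw [List.foldl_cons, step, ih hts]
      simp [pvBuild_cons, hbC]

-- ===== VERDICT (by name: the statement is the Claim_ definition above) =====
theorem clean_bullet_points_spec : Claim_equal_clean_bullet_points := by
  intro text _
  unfold Spec_clean_bullet_points clean_bullet_points clean_bullet_points_alt
  have hmap :
      ((PySem.Str.split? (PySem.Str.strip text) "\n").getD []).foldl
        (fun cleaned line0 =>
          let line := PySem.Str.strip line0
          if line ≠ "" ∧ PySem.Str.startswith line "*" = true then
            cleaned ++ [PySem.Str.strip (PySem.Str.slice line (some 1) none)]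
          else if line ≠ "" ∧ PySem.Str.startswith line "*" = false ∧ cleaned ≠ [] then
            cleaned.dropLast ++ [cleaned.getLast! ++ " " ++ line]
          else cleaned) [] =
      (((PySem.Str.split? (PySem.Str.strip text) "\n").getD []).map
        (fun raw => PySem.Str.strip raw)).foldl pvStep [] := by
    rw [List.foldl_map]
    rfl
  rw [hmap, pvFoldl_filter]
  exact pvFold_nil _ (fun l hl => by simpa using (List.mem_filter.mp hl).2)
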